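-- pv_equiv track=rewrite | github.com/nozelk/kattis | factovisors.py | resi
-- ===== SOURCE A (Python) =====
-- import math
--
-- def resi(n, m):
--     if m == 0:
--         return False
--     if m == 1 and n == 0:
--         return True
--
--
--     for i in range(2, int(math.sqrt(m) + 1)):
--         st_trenutnih_veckratnikov = 0
--         veckratnik = i
--         #odstranjujemo veckratnike stevila
--         while m % i == 0:
--             m //= i
--             st_trenutnih_veckratnikov += 1
--         #nadzorujemo te veckratike stevila
--         while veckratnik <= n and st_trenutnih_veckratnikov > 0:
--             st_trenutnih_veckratnikov -= n // veckratnik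
--             veckratnik *= i
--         #ce bo k vec od nic torej pomeni da ni sestavel iz toliko veckratikot tega stevila ta strevilo ne deli stega stevila
--         if st_trenutnih_veckratnikov > 0:
--             return False
--
--
--     return m <= n
-- ===== SOURCE B (Python) =====
-- import math
--
-- def resi(n, m):
--     # Does m divide n! ?  Two passes: factorize m by trial division,
--     # then check each prime with the closed form v_p(n!) = (n - digitsum_p(n)) // (p - 1).
--     if m == 0:
--         return False
--     if n < 0:
--         return False
--     if m == 1:
--         return True
--     # pass 1: prime factorization of m
--     factors = []
--     for i in range(2, math.isqrt(m) + 1):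
--         e = 0
--         while m % i == 0:
--             m //= i
--             e += 1
--         if e > 0:
--             factors.append((i, e))
--     if m > 1:
--         factors.append((m, 1))  # leftover prime > sqrt(original m)
--     # pass 2: Legendre via base-p digit sum
--     for p, e in factors:
--         t = n
--         s = 0
--         while t > 0:
--             s += t % p
--             t //= p
--         if e > (n - s) // (p - 1):
--             return False
--     return True
-- ===== Notes on version B (the rewrite author's own statement) =====
-- stated objective: alternative
-- what changed: A fuses factorization and exponent checking in one loop, repeatedly subtracting n//p^k from the exponent; B makes two separate passes: it first builds the full prime factorization of m, then tests each prime p with the closed-form Legendre exponent (n - digitsum_p(n)) // (p - 1) computed from the base-p digit sum of n.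
import Mathlib
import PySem

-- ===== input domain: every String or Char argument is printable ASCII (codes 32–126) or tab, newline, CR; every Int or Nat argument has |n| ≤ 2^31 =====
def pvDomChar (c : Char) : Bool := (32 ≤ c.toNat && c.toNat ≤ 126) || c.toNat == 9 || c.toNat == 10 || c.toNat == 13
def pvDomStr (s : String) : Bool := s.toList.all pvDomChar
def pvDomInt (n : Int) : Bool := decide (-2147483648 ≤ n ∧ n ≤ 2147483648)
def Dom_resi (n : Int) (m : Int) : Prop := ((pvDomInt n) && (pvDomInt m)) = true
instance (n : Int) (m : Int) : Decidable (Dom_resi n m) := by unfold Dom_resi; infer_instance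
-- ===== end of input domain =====

-- B re-implements A in two passes (factorize m, then closed-form Legendre exponents via base-p
-- digit sums) instead of A's inline repeated-subtraction loop; same cost, different algorithm.

-- ===== PORT A =====
-- 'while m % i == 0: m //= i; cnt += 1'.  The '2 ≤ i ∧ 1 ≤ m' conjuncts only make the loop
-- total (they hold at every reachable call and never change the computed value there).
def resiDiv (i : Int) (m : Int) (cnt : Int) : Int × Int :=
  if h : 2 ≤ i ∧ 1 ≤ m ∧ PySem.Int.mod m i = 0 then
    resiDiv i (PySem.Int.floordiv m i) (cnt + 1)
  else (m, cnt)
termination_by m.toNat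
decreasing_by
  obtain ⟨h1, h2, h3⟩ := h
  have ha : PySem.Int.floordiv m i < m := by
    rw [PySem.Int.floordiv_lt_iff_lt_mul (by omega)]; nlinarith
  have hb : 0 ≤ PySem.Int.floordiv m i := by
    rw [PySem.Int.le_floordiv_iff_mul_le (by omega)]; omega
  omega

-- 'while veckratnik <= n and st > 0: st -= n // veckratnik; veckratnik *= i'.
-- The '2 ≤ i ∧ 1 ≤ v' conjuncts only make the loop total (invariants of every reachable call).
def resiCheck (n : Int) (i : Int) (e : Int) (v : Int) : Int :=
  if h : 2 ≤ i ∧ 1 ≤ v ∧ v ≤ n ∧ 0 < e then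
    resiCheck n i (e - PySem.Int.floordiv n v) (v * i)
  else e
termination_by (n + 1 - v).toNat
decreasing_by
  obtain ⟨h1, h2, h3, h4⟩ := h
  have hvv : v + 1 ≤ v * i := by nlinarith
  omega

-- the 'for i in range(…)' body with its two early 'return False' exits
def resiOuter (n : Int) : List Int → Int → Bool
  | [], m => decide (m ≤ n)
  | i :: rest, m =>
    let d := resiDiv i m 0
    if 0 < resiCheck n i d.2 i then false else resiOuter n rest d.1

-- int(math.sqrt(m) + 1) = isqrt(m) + 1, exact for 0 ≤ m ≤ 2^31 (double sqrt is correctly rounded)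
def resi (n : Int) (m : Int) : Bool :=
  if m = 0 then false
  else if m = 1 ∧ n = 0 then true
  else resiOuter n (PySem.List.pyRange 2 ((m.toNat.sqrt : Int) + 1) 1) m

-- ===== PORT B =====
-- B's 'while m % i == 0: m //= i; e += 1' (totality conjuncts as in resiDiv)
def altDiv (i : Int) (m : Int) (e : Int) : Int × Int :=
  if h : 2 ≤ i ∧ 1 ≤ m ∧ PySem.Int.mod m i = 0 then
    altDiv i (PySem.Int.floordiv m i) (e + 1)
  else (m, e)
termination_by m.toNat
decreasing_by
  obtain ⟨h1, h2, h3⟩ := h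
  have ha : PySem.Int.floordiv m i < m := by
    rw [PySem.Int.floordiv_lt_iff_lt_mul (by omega)]; nlinarith
  have hb : 0 ≤ PySem.Int.floordiv m i := by
    rw [PySem.Int.le_floordiv_iff_mul_le (by omega)]; omega
  omega

-- pass 1: trial division collecting (prime, exponent) pairs and the reduced leftover m
def altFactor : List Int → Int → List (Int × Int) × Int
  | [], m => ([], m)
  | i :: rest, m =>
    let d := altDiv i m 0
    let r := altFactor rest d.1
    (if 0 < d.2 then (i, d.2) :: r.1 else r.1, r.2)

-- 'while t > 0: s += t % p; t //= p' ('2 ≤ p' only makes the loop total; holds at every call)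
def altDigitSum (p : Int) (t : Int) (s : Int) : Int :=
  if h : 2 ≤ p ∧ 0 < t then
    altDigitSum p (PySem.Int.floordiv t p) (s + PySem.Int.mod t p)
  else s
termination_by t.toNat
decreasing_by
  obtain ⟨h1, h2⟩ := h
  have ha : PySem.Int.floordiv t p < t := by
    rw [PySem.Int.floordiv_lt_iff_lt_mul (by omega)]; nlinarith
  have hb : 0 ≤ PySem.Int.floordiv t p := by
    rw [PySem.Int.le_floordiv_iff_mul_le (by omega)]; omega
  omega

-- pass 2: 'for p, e in factors: if e > (n - s) // (p - 1): return False' / final 'return True'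
def altCheck (n : Int) (ps : List (Int × Int)) : Bool :=
  ps.all fun pe =>
    !decide (PySem.Int.floordiv (n - altDigitSum pe.1 n 0) (pe.1 - 1) < pe.2)

def resi_alt (n : Int) (m : Int) : Bool :=
  if m = 0 then false
  else if n < 0 then false
  else if m = 1 then true
  else
    let f := altFactor (PySem.List.pyRange 2 ((m.toNat.sqrt : Int) + 1) 1) m
    altCheck n (if 1 < f.2 then f.1 ++ [(f.2, 1)] else f.1)

-- ===== PRECONDITION & SPEC =====
-- Pre_ excludes exactly m < 0, where A raises ValueError (math.sqrt of a negative number).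
def Pre_resi (n : Int) (m : Int) : Prop := 0 ≤ m
instance (n : Int) (m : Int) : Decidable (Pre_resi n m) := by unfold Pre_resi; infer_instance
def pvWitness_resi : Int × Int := (6, 9)
def Spec_resi (n : Int) (m : Int) (out : Bool) : Prop := out = resi_alt n m
instance (n : Int) (m : Int) (out : Bool) : Decidable (Spec_resi n m out) := by unfold Spec_resi; infer_instance

-- ===== CLAIM (what is proved, stated in full; the proofs are below) =====
def Claim_equal_resi : Prop := ∀ (n : Int) (m : Int), Dom_resi n m → Pre_resi n m → Spec_resi n m (resi n m)

-- ===== LEMMAS AND PROOFS =====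

-- proof-only abbreviation: the full Legendre sum  Σ_{k≥0, v·i^k ≤ n} ⌊n / (v·i^k)⌋
def legSum (n : Int) (i : Int) (v : Int) : Int :=
  if h : 2 ≤ i ∧ 1 ≤ v ∧ v ≤ n then
    PySem.Int.floordiv n v + legSum n i (v * i)
  else 0
termination_by (n + 1 - v).toNat
decreasing_by
  obtain ⟨h1, h2, h3⟩ := h
  have hvv : v + 1 ≤ v * i := by nlinarith
  omega

lemma legSum_nonneg (n i v : Int) : 0 ≤ legSum n i v := by
  fun_induction legSum with
  | case1 v h ih =>
    obtain ⟨h1, h2, h3⟩ := h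
    have : 1 ≤ PySem.Int.floordiv n v := by
      rw [PySem.Int.le_floordiv_iff_mul_le (by omega)]; omega
    omega
  | case2 v h => omega

lemma resiCheck_of_nonpos (n i e v : Int) (he : ¬ 0 < e) : resiCheck n i e v = e := by
  rw [resiCheck.eq_def, dif_neg (by tauto)]

-- A's subtract-until-nonpositive loop fails (stays positive) iff e exceeds the full Legendre sum
lemma check_iff (n i : Int) (hi : 2 ≤ i) :
    ∀ (k : Nat) (v : Int), (n + 1 - v).toNat < k → 1 ≤ v → ∀ e,
      (0 < resiCheck n i e v ↔ legSum n i v < e) := by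
  intro k
  induction k with
  | zero => intro v hk; omega
  | succ k ih =>
    intro v hk hv e
    by_cases hvn : v ≤ n
    · rw [legSum.eq_def, dif_pos ⟨hi, hv, hvn⟩]
      have hq : 1 ≤ PySem.Int.floordiv n v := by
        rw [PySem.Int.le_floordiv_iff_mul_le (by omega)]; omega
      have h2 : v + 1 ≤ v * i := by nlinarith
      by_cases he : 0 < e
      · rw [resiCheck.eq_def, dif_pos ⟨hi, hv, hvn, he⟩]
        rw [ih (v * i) (by omega) (by omega) (e - PySem.Int.floordiv n v)]
        omega
      · rw [resiCheck_of_nonpos n i e v he]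
        have := legSum_nonneg n i (v * i)
        omega
    · rw [resiCheck.eq_def, dif_neg (by tauto), legSum.eq_def, dif_neg (by tauto)]

-- shift: summing from v·i over n equals summing from v over n // i
lemma legSum_shift (n i : Int) (hi : 2 ≤ i) (hn : 0 ≤ n) :
    ∀ (k : Nat) (v : Int), (PySem.Int.floordiv n i + 1 - v).toNat < k → 1 ≤ v →
      legSum n i (i * v) = legSum (PySem.Int.floordiv n i) i v := by
  intro k
  induction k with
  | zero => intro v hk; omega
  | succ k ih =>
    intro v hk hv
    have hfd : PySem.Int.floordiv n i = n / i := PySem.Int.floordiv_eq_ediv_of_pos (by omega)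
    have hcond : i * v ≤ n ↔ v ≤ PySem.Int.floordiv n i := by
      rw [hfd, Int.le_ediv_iff_mul_le (by omega)]
      constructor <;> intro h <;> nlinarith
    by_cases hvn : v ≤ PySem.Int.floordiv n i
    · rw [legSum.eq_def, dif_pos ⟨hi, by nlinarith, hcond.mpr hvn⟩]
      conv_rhs => rw [legSum.eq_def]
      rw [dif_pos ⟨hi, hv, hvn⟩]
      have hdd : PySem.Int.floordiv n (i * v) = PySem.Int.floordiv (PySem.Int.floordiv n i) v := by
        rw [hfd, PySem.Int.floordiv_eq_ediv_of_pos (by nlinarith),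
            PySem.Int.floordiv_eq_ediv_of_pos (by omega), Int.ediv_ediv_of_nonneg (by omega)]
      have h2 : v + 1 ≤ v * i := by nlinarith
      have harr : i * v * i = i * (v * i) := by ring
      rw [hdd, harr, ih (v * i) (by omega) (by omega)]
    · rw [legSum.eq_def, dif_neg (by rw [hcond]; tauto)]
      rw [legSum.eq_def, dif_neg (by tauto)]

lemma digitSum_acc (p : Int) : ∀ (k : Nat) (t : Int), t.toNat < k → ∀ s,
    altDigitSum p t s = s + altDigitSum p t 0 := by
  intro k
  induction k with
  | zero => intro t hk; omega
  | succ k ih =>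
    intro t hk s
    by_cases h : 2 ≤ p ∧ 0 < t
    · have hb : 0 ≤ PySem.Int.floordiv t p := by
        rw [PySem.Int.le_floordiv_iff_mul_le (by omega)]; omega
      have ha : PySem.Int.floordiv t p < t := by
        rw [PySem.Int.floordiv_lt_iff_lt_mul (by omega)]; nlinarith [h.1, h.2]
      rw [altDigitSum.eq_def p t s, dif_pos h]
      conv_rhs => rw [altDigitSum.eq_def p t 0]
      rw [dif_pos h,
          ih (PySem.Int.floordiv t p) (by omega) (s + PySem.Int.mod t p),
          ih (PySem.Int.floordiv t p) (by omega) (0 + PySem.Int.mod t p)]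
      omega
    · rw [altDigitSum.eq_def p t s, dif_neg h]
      rw [altDigitSum.eq_def p t 0, dif_neg h]
      omega

-- the digit identity: (i-1) · Σ_k ⌊n/i^k⌋ = n - digitsum_i(n)
lemma legSum_digit (i : Int) (hi : 2 ≤ i) :
    ∀ (k : Nat) (n : Int), n.toNat < k → 0 ≤ n →
      (i - 1) * legSum n i i = n - altDigitSum i n 0 := by
  intro k
  induction k with
  | zero => intro n hk; omega
  | succ k ih =>
    intro n hk hn
    by_cases hn0 : n = 0
    · subst hn0
      rw [legSum.eq_def, dif_neg (by omega), altDigitSum.eq_def, dif_neg (by omega)]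
      ring
    · have hq0 : 0 ≤ PySem.Int.floordiv n i := by
        rw [PySem.Int.le_floordiv_iff_mul_le (by omega)]; omega
      have h2n : n * 2 ≤ n * i := mul_le_mul_of_nonneg_left hi (by omega)
      have hqlt : PySem.Int.floordiv n i < n := by
        rw [PySem.Int.floordiv_lt_iff_lt_mul (by omega)]; omega
      -- one unfolding of digitsum
      have hds : altDigitSum i n 0 = PySem.Int.mod n i + altDigitSum i (PySem.Int.floordiv n i) 0 := by
        rw [altDigitSum.eq_def i n 0, dif_pos ⟨hi, by omega⟩,
            digitSum_acc i (n.toNat + 1) (PySem.Int.floordiv n i) (by omega)]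
        omega
      -- one unfolding of the Legendre sum
      have hls : legSum n i i = PySem.Int.floordiv n i + legSum (PySem.Int.floordiv n i) i i := by
        by_cases hin : i ≤ n
        · rw [legSum.eq_def n i i, dif_pos ⟨hi, by omega, hin⟩,
              legSum_shift n i hi hn ((PySem.Int.floordiv n i + 1 - i).toNat + 1) i (by omega) (by omega)]
        · have hq : PySem.Int.floordiv n i = 0 := by
            rw [PySem.Int.floordiv_eq_ediv_of_pos (by omega)]
            exact Int.ediv_eq_zero_of_lt hn (by omega)
          rw [legSum.eq_def n i i, dif_neg (by tauto), hq, legSum.eq_def, dif_neg (by omega)]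
          omega
      have hih := ih (PySem.Int.floordiv n i) (by omega) hq0
      have hdm := PySem.Int.floordiv_mul_add_mod n i
      rw [hls, hds]
      nlinarith [hih, hdm]

-- B's per-prime bound is exactly the Legendre sum
lemma bound_eq (n i : Int) (hi : 2 ≤ i) (hn : 0 ≤ n) :
    PySem.Int.floordiv (n - altDigitSum i n 0) (i - 1) = legSum n i i := by
  have h := legSum_digit i hi (n.toNat + 1) n (by omega) hn
  rw [← h, PySem.Int.floordiv_eq_ediv_of_pos (by omega),
      Int.mul_ediv_cancel_left _ (by omega)]

-- resiDiv and altDiv are the same loop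
lemma div_eq (i m c : Int) : resiDiv i m c = altDiv i m c := by
  fun_induction resiDiv with
  | case1 m c h ih => rw [altDiv.eq_def, dif_pos h, ih]
  | case2 m c h => rw [altDiv.eq_def, dif_neg h]

lemma resiDiv_pos (i m c : Int) : 1 ≤ m → 1 ≤ (resiDiv i m c).1 := by
  fun_induction resiDiv with
  | case1 m c h ih =>
    intro hm
    obtain ⟨h1, h2, h3⟩ := h
    have hdvd : i ∣ m := (PySem.Int.mod_eq_zero_iff_dvd m i).mp h3
    have hle : i ≤ m := Int.le_of_dvd (by omega) hdvd
    exact ih (by rw [PySem.Int.le_floordiv_iff_mul_le (by omega)]; omega)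
  | case2 m c h => intro hm; exact hm

lemma resiDiv_cnt (i m c : Int) : c ≤ (resiDiv i m c).2 := by
  fun_induction resiDiv with
  | case1 m c h ih => omega
  | case2 m c h => omega

lemma altFactor_pos : ∀ (is : List Int) (m : Int), 1 ≤ m → (∀ i ∈ is, 2 ≤ i) →
    1 ≤ (altFactor is m).2 := by
  intro is
  induction is with
  | nil => intro m hm _; exact hm
  | cons i rest ih =>
    intro m hm hall
    simp only [altFactor]
    refine ih _ ?_ (fun j hj => hall j (by simp [hj]))
    rw [← div_eq]
    exact resiDiv_pos i m 0 hm

lemma altFactor_mem : ∀ (is : List Int) (m : Int), ∀ pe ∈ (altFactor is m).1,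
    pe.1 ∈ is ∧ 1 ≤ pe.2 := by
  intro is
  induction is with
  | nil => intro m pe hpe; simp [altFactor] at hpe
  | cons i rest ih =>
    intro m pe hpe
    simp only [altFactor] at hpe
    by_cases hd : 0 < (altDiv i m 0).2
    · rw [if_pos hd] at hpe
      rcases List.mem_cons.mp hpe with h | h
      · subst h; exact ⟨by simp, by omega⟩
      · have := ih _ pe h; exact ⟨by simp [this.1], this.2⟩
    · rw [if_neg hd] at hpe
      have := ih _ pe hpe; exact ⟨by simp [this.1], this.2⟩

lemma altFactor_nil_eq : ∀ (is : List Int) (m : Int),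
    (altFactor is m).1 = [] → (altFactor is m).2 = m := by
  intro is
  induction is with
  | nil => intro m _; rfl
  | cons i rest ih =>
    intro m h
    simp only [altFactor] at h ⊢
    by_cases hd : 0 < (altDiv i m 0).2
    · rw [if_pos hd] at h; simp at h
    · rw [if_neg hd] at h
      have hd0 : (altDiv i m 0).1 = m := by
        by_cases hg : 2 ≤ i ∧ 1 ≤ m ∧ PySem.Int.mod m i = 0
        · exfalso
          apply hd
          rw [altDiv.eq_def, dif_pos hg]
          have hc := resiDiv_cnt i (PySem.Int.floordiv m i) (0 + 1)
          rw [div_eq] at hc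
          omega
        · rw [altDiv.eq_def, dif_neg hg]
      rw [ih _ h, hd0]

-- the core correspondence: A's fused loop = B's factorize-then-check (for n ≥ 0)
lemma outer_eq (n : Int) (hn : 0 ≤ n) : ∀ (is : List Int) (m : Int), 1 ≤ m →
    (∀ i ∈ is, 2 ≤ i) →
    resiOuter n is m =
      (altCheck n (altFactor is m).1 && decide ((altFactor is m).2 ≤ n)) := by
  intro is
  induction is with
  | nil => intro m hm _; simp [resiOuter, altFactor, altCheck]
  | cons i rest ih =>
    intro m hm hall
    have hi : 2 ≤ i := hall i (by simp)
    have hrest : ∀ j ∈ rest, 2 ≤ j := fun j hj => hall j (by simp [hj])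
    have hm' : 1 ≤ (resiDiv i m 0).1 := resiDiv_pos i m 0 hm
    have he0 : 0 ≤ (resiDiv i m 0).2 := resiDiv_cnt i m 0
    simp only [resiOuter, altFactor, ← div_eq]
    by_cases he : 0 < (resiDiv i m 0).2
    · rw [if_pos he]
      have hchk := check_iff n i hi ((n + 1 - i).toNat + 1) i (by omega) (by omega) (resiDiv i m 0).2
      have hbnd := bound_eq n i hi hn
      by_cases hfail : 0 < resiCheck n i (resiDiv i m 0).2 i
      · rw [if_pos hfail]
        have hlt : legSum n i i < (resiDiv i m 0).2 := hchk.mp hfail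
        simp only [altCheck, List.all_cons]
        rw [hbnd, decide_eq_true hlt]
        simp
      · rw [if_neg hfail]
        have hpass : ¬ legSum n i i < (resiDiv i m 0).2 := fun hc => hfail (hchk.mpr hc)
        simp only [altCheck, List.all_cons]
        rw [hbnd, decide_eq_false hpass]
        simp only [Bool.not_false, Bool.true_and]
        exact ih _ hm' hrest
    · rw [if_neg he, resiCheck_of_nonpos n i _ i he, if_neg he]
      exact ih _ hm' hrest

lemma outer_neg (n : Int) (hn : n < 0) : ∀ (is : List Int) (m : Int), 1 ≤ m →
    (∀ i ∈ is, 2 ≤ i) → resiOuter n is m = false := by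
  intro is
  induction is with
  | nil =>
    intro m hm _
    simp only [resiOuter, decide_eq_false_iff_not]
    omega
  | cons i rest ih =>
    intro m hm hall
    have hi : 2 ≤ i := hall i (by simp)
    simp only [resiOuter]
    have hchk : resiCheck n i (resiDiv i m 0).2 i = (resiDiv i m 0).2 := by
      rw [resiCheck.eq_def, dif_neg (by omega)]
    by_cases he : 0 < (resiDiv i m 0).2
    · rw [hchk, if_pos he]
    · rw [hchk, if_neg he]
      exact ih _ (resiDiv_pos i m 0 hm) (fun j hj => hall j (by simp [hj]))

-- leftover prime r ≥ 2 with exponent 1: B's check on (r,1) is exactly 'r ≤ n'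
lemma leftover_iff (n r : Int) (hr : 2 ≤ r) (hn : 0 ≤ n) :
    (r ≤ n) ↔ 1 ≤ legSum n r r := by
  constructor
  · intro h
    rw [legSum.eq_def, dif_pos ⟨hr, by omega, h⟩]
    have h1 : 1 ≤ PySem.Int.floordiv n r := by
      rw [PySem.Int.le_floordiv_iff_mul_le (by omega)]; omega
    have := legSum_nonneg n r (r * r)
    omega
  · intro h
    by_contra hc
    rw [legSum.eq_def, dif_neg (by omega)] at h
    omega

-- ===== VERDICT (by name: the statement is the Claim_ definition above) =====
theorem resi_spec : Claim_equal_resi := by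
  intro n m _ hpre
  unfold Spec_resi Pre_resi at *
  by_cases hm0 : m = 0
  · simp [resi, resi_alt, hm0]
  · by_cases hm1 : m = 1
    · subst hm1
      have hrange : PySem.List.pyRange 2 (((1 : Int).toNat.sqrt : Int) + 1) 1 = [] := by decide
      by_cases hneg : n < 0
      · rw [resi, if_neg hm0, if_neg (by omega), hrange, resi_alt, if_neg hm0, if_pos hneg]
        simp only [resiOuter, decide_eq_false_iff_not]
        omega
      · by_cases hn0 : n = 0
        · rw [resi, if_neg hm0, if_pos ⟨rfl, hn0⟩, resi_alt, if_neg hm0, if_neg hneg, if_pos rfl]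
        · rw [resi, if_neg hm0, if_neg (by tauto), hrange, resi_alt, if_neg hm0, if_neg hneg,
              if_pos rfl]
          simp only [resiOuter, decide_eq_true_iff]
          omega
    · -- m ≥ 2
      set R := PySem.List.pyRange 2 ((m.toNat.sqrt : Int) + 1) 1 with hR
      have hallR : ∀ i ∈ R, 2 ≤ i := by
        intro i hiR
        rw [hR, PySem.List.mem_pyRange_one] at hiR
        omega
      rw [resi, if_neg hm0, if_neg (by tauto), resi_alt, if_neg hm0]
      by_cases hneg : n < 0
      · rw [if_pos hneg]
        exact outer_neg n hneg R m (by omega) hallR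
      · rw [if_neg hneg, if_neg hm1]
        have hn : 0 ≤ n := by omega
        rw [outer_eq n hn R m (by omega) hallR]
        rcases hfac : altFactor R m with ⟨ps, r⟩
        show (altCheck n ps && decide (r ≤ n)) = altCheck n (if 1 < r then ps ++ [(r, 1)] else ps)
        have hr1 : 1 ≤ r := by
          have := altFactor_pos R m (by omega) hallR
          rw [hfac] at this
          exact this
        by_cases hr : 1 < r
        · rw [if_pos hr]
          simp only [altCheck, List.all_append, List.all_cons, List.all_nil, Bool.and_true]
          have hb := bound_eq n r (by omega) hn
          have hiff := leftover_iff n r (by omega) hn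
          congr 1
          rw [hb]
          by_cases hle : r ≤ n
          · rw [decide_eq_true hle, decide_eq_false (by have := hiff.mp hle; omega)]; rfl
          · rw [decide_eq_false hle, decide_eq_true (by rw [hiff] at hle; omega)]; rfl
        · rw [if_neg hr]
          have hr2 : r = 1 := by omega
          by_cases hn1 : 1 ≤ n
          · rw [decide_eq_true (by omega), Bool.and_true]
          · -- n = 0: some factor pair exists and its check fails, so both sides are false
            have hn0 : n = 0 := by omega
            have hne : ps ≠ [] := by
              intro hnil
              have := altFactor_nil_eq R m
              rw [hfac] at this
              have := this hnil
              omega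
            obtain ⟨pe, hpe⟩ := List.exists_mem_of_ne_nil ps hne
            have hmem := altFactor_mem R m pe (by rw [hfac]; exact hpe)
            have hp2 : 2 ≤ pe.1 := hallR pe.1 hmem.1
            have hfalse : altCheck n ps = false := by
              rw [altCheck, List.all_eq_false]
              refine ⟨pe, hpe, ?_⟩
              have hds : altDigitSum pe.1 n 0 = 0 := by
                rw [altDigitSum.eq_def, dif_neg (by omega)]
              have hfd : PySem.Int.floordiv (n - altDigitSum pe.1 n 0) (pe.1 - 1) = 0 := by
                rw [hds, hn0, PySem.Int.floordiv_eq_ediv_of_pos (by omega)]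
                simp
              simp only [hfd]
              rw [decide_eq_true (by omega)]
              simp
            rw [hfalse]
            simp
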